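-- pv_equiv track=rewrite | github.com/HusmatZ/monitor-deportivo-dash | views/athlete/monitor_view.py | _segments_from_mask
-- ===== SOURCE A (Python) =====
-- def _segments_from_mask(t, mask):
--     segs = []
--     if not t or not mask or len(t) != len(mask):
--         return segs
--
--     start = None
--     for i, on in enumerate(mask):
--         if on and start is None:
--             start = t[i]
--         if (not on) and start is not None:
--             end = t[i]
--             segs.append((start, end))
--             start = None
--
--     if start is not None:
--         segs.append((start, t[-1]))
--     return segs
-- ===== SOURCE B (Python) =====
-- def _segments_from_mask(t, mask):
--     if not t or not mask or len(t) != len(mask):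
--         return []
--     segs = []
--     n = len(mask)
--     i = 0
--     while i < n:
--         if not mask[i]:
--             i += 1
--             continue
--         start = t[i]
--         j = i + 1
--         while j < n and mask[j]:
--             j += 1
--         segs.append((start, t[j] if j < n else t[-1]))
--         i = j + 1
--     return segs
-- ===== Notes on version B (the rewrite author's own statement) =====
-- stated objective: alternative
-- what changed: Replaces the stateful start/None single pass with a run-length scan: an outer loop skips False entries and, for each True run, an inner loop finds the run's end and emits (t[start], t[end] or t[-1]) directly, so no Option-like sentinel state is carried.
import Mathlib
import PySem

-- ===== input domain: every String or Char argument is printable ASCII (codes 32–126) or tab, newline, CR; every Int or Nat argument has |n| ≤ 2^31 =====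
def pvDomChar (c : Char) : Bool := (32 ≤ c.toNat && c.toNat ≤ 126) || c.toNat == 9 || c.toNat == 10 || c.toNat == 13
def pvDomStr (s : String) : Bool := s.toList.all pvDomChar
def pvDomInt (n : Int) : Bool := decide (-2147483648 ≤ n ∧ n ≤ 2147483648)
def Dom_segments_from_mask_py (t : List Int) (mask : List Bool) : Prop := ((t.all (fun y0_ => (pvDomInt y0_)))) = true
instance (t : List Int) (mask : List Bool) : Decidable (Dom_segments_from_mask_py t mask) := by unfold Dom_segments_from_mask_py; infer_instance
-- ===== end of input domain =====

-- B replaces A's stateful start/None single pass by a run-length scan (skip falses, consume each true run, emit its segment); alternative decomposition, same O(n) cost.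


-- ===== PORT A =====
-- loop body of A's 'for i, on in enumerate(mask)': state = (segs, start)
def aStep (t : List Int) (acc : List (Int × Int) × Option Int) (p : Int × Bool) :
    List (Int × Int) × Option Int :=
  let acc1 := if p.2 = true ∧ acc.2 = none then (acc.1, some (PySem.List.pyGetD t p.1 0)) else acc
  match acc1.2 with
  | some s => if p.2 = false then (acc1.1 ++ [(s, PySem.List.pyGetD t p.1 0)], none) else acc1
  | none => acc1

def segments_from_mask_py (t : List Int) (mask : List Bool) : List (Int × Int) :=
  if t = [] ∨ mask = [] ∨ t.length ≠ mask.length then []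
  else
    let st := (PySem.List.enumerate mask 0).foldl (aStep t) ([], none)
    match st.2 with
    | some s => st.1 ++ [(s, PySem.List.pyGetD t (-1) 0)]
    | none => st.1

-- ===== PORT B =====
-- Source B's two loops over the remaining (time, flag) pairs:
-- altGo = the outer while (skipping False entries), altRun = the inner while (consuming a True run)
mutual
def altGo (last : Int) : List (Int × Bool) → List (Int × Int)
  | [] => []
  | (_, false) :: rest => altGo last rest
  | (x, true) :: rest => altRun last x rest
def altRun (last start : Int) : List (Int × Bool) → List (Int × Int)
  | [] => [(start, last)]
  | (_, true) :: rest => altRun last start rest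
  | (y, false) :: rest => (start, y) :: altGo last rest
end

def segments_from_mask_py_alt (t : List Int) (mask : List Bool) : List (Int × Int) :=
  if t = [] ∨ mask = [] ∨ t.length ≠ mask.length then []
  else altGo (PySem.List.pyGetD t (-1) 0) (t.zip mask)

-- ===== PRECONDITION & SPEC =====
def Spec_segments_from_mask_py (t : List Int) (mask : List Bool) (out : List (Int × Int)) : Prop := out = segments_from_mask_py_alt t mask
instance (t : List Int) (mask : List Bool) (out : List (Int × Int)) : Decidable (Spec_segments_from_mask_py t mask out) := by unfold Spec_segments_from_mask_py; infer_instance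

-- ===== CLAIM (what is proved, stated in full; the proofs are below) =====
def Claim_equal_segments_from_mask_py : Prop := ∀ (t : List Int) (mask : List Bool), Dom_segments_from_mask_py t mask → Spec_segments_from_mask_py t mask (segments_from_mask_py t mask)

-- ===== LEMMAS AND PROOFS =====

-- step of A's loop with the time value already looked up (p = (t[i], mask[i]))
def zStep (acc : List (Int × Int) × Option Int) (p : Int × Bool) :
    List (Int × Int) × Option Int :=
  let acc1 := if p.2 = true ∧ acc.2 = none then (acc.1, some p.1) else acc
  match acc1.2 with
  | some s => if p.2 = false then (acc1.1 ++ [(s, p.1)], none) else acc1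
  | none => acc1

-- indexed lookups over 'enumerate' collapse to the zipped list
theorem mapEnum (m : List Bool) : ∀ (tpre tsuf : List Int), tsuf.length = m.length →
    (PySem.List.enumerate m (tpre.length : Int)).map
      (fun p => (PySem.List.pyGetD (tpre ++ tsuf) p.1 0, p.2)) = tsuf.zip m := by
  induction m with
  | nil =>
    intro tpre tsuf h
    simp [List.length_eq_zero_iff.mp h, PySem.List.enumerate]
  | cons on m ih =>
    intro tpre tsuf h
    match tsuf with
    | [] => simp at h
    | v :: ts =>
      rw [PySem.List.enumerate_cons, List.map_cons]
      have h1 : PySem.List.pyGetD (tpre ++ v :: ts) (tpre.length : Int) 0 = v := by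
        simp [List.getD]
      have h2 := ih (tpre ++ [v]) ts (by simpa using h)
      simp only [List.length_append, List.length_cons, List.length_nil] at h2
      push_cast at h2 ⊢
      rw [List.append_assoc] at h2
      simp only [List.cons_append, List.nil_append] at h2
      rw [h1, h2]
      rfl

-- folding A's state machine over the zipped list, then finalising, is B's run-length scan
theorem foldZ (last : Int) (l : List (Int × Bool)) :
    (∀ segs, (match (l.foldl zStep (segs, none)) with
       | (s1, some s) => s1 ++ [(s, last)] | (s1, none) => s1) = segs ++ altGo last l) ∧
    (∀ segs s, (match (l.foldl zStep (segs, some s)) with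
       | (s1, some s') => s1 ++ [(s', last)] | (s1, none) => s1) = segs ++ altRun last s l) := by
  induction l with
  | nil => exact ⟨fun segs => by simp [altGo], fun segs s => by simp [altRun]⟩
  | cons p l ih =>
    obtain ⟨x, on⟩ := p
    cases on
    · refine ⟨fun segs => ?_, fun segs s => ?_⟩
      · rw [List.foldl_cons]
        simpa [zStep, altGo] using ih.1 segs
      · rw [List.foldl_cons]
        have := ih.1 (segs ++ [(s, x)])
        simpa [zStep, altRun, List.append_assoc] using this
    · refine ⟨fun segs => ?_, fun segs s => ?_⟩
      · rw [List.foldl_cons]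
        simpa [zStep, altGo] using ih.2 segs x
      · rw [List.foldl_cons]
        simpa [zStep, altRun] using ih.2 segs s

-- ===== VERDICT (by name: the statement is the Claim_ definition above) =====
theorem segments_from_mask_py_spec : Claim_equal_segments_from_mask_py := by
  intro t mask _
  unfold Spec_segments_from_mask_py segments_from_mask_py segments_from_mask_py_alt
  by_cases hc : t = [] ∨ mask = [] ∨ t.length ≠ mask.length
  · simp [hc]
  · rw [if_neg hc, if_neg hc]
    have hlen : t.length = mask.length := by
      by_contra h; exact hc (Or.inr (Or.inr h))
    have hstep : aStep t = fun acc p => zStep acc (PySem.List.pyGetD t p.1 0, p.2) := by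
      funext acc p; rfl
    have hmap := mapEnum mask [] t (by simpa using hlen)
    simp only [List.nil_append, List.length_nil, Int.natCast_zero] at hmap
    rw [hstep, ← List.foldl_map, hmap]
    have h := (foldZ (PySem.List.pyGetD t (-1) 0) (t.zip mask)).1 []
    simp only [List.nil_append] at h
    rcases hr : List.foldl zStep ([], none) (t.zip mask) with ⟨s1, st⟩
    rw [hr] at h
    cases st <;> simpa using h
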